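-- pv_equiv track=rewrite | github.com/megascienta/sciona | src/sciona/code_analysis/tools/call_extraction.py | normalize_call_identifiers
-- ===== SOURCE A (Python) =====
-- from typing import Callable, Sequence, Set
--
-- def normalize_call_identifiers(
--     resolved_calls: Sequence[tuple[str, str, str, Sequence[str]]],
-- ) -> list[tuple[str, str, str, list[str]]]:
--     terminal_map_by_scope: dict[tuple[str, str], dict[str, str | None]] = {}
--     for language, qualified, node_type, identifiers in resolved_calls:
--         scope = _module_scope_for_call(qualified, node_type)
--         bucket = terminal_map_by_scope.setdefault((language, scope), {})
--         for identifier in identifiers: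
--             if "." not in identifier:
--                 continue
--             terminal = identifier.rsplit(".", 1)[-1]
--             existing = bucket.get(terminal)
--             if existing is None and terminal in bucket:
--                 continue
--             if existing is None:
--                 bucket[terminal] = identifier
--             elif existing != identifier:
--                 bucket[terminal] = None
--     normalized: list[tuple[str, str, str, list[str]]] = []
--     for language, qualified, node_type, identifiers in resolved_calls:
--         scope = _module_scope_for_call(qualified, node_type)
--         terminal_map = terminal_map_by_scope.get((language, scope), {})
--         updated: list[str] = []
--         for identifier in identifiers:
--             if "." in identifier:
--                 updated.append(identifier)
--             else:
--                 mapped = terminal_map.get(identifier)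
--                 if mapped:
--                     updated.append(mapped)
--                 else:
--                     updated.append(identifier)
--         normalized.append((language, qualified, node_type, updated))
--     return normalized
--
-- def _module_scope_for_call(qualified_name: str, node_type: str) -> str:
--     parts = qualified_name.split(".")
--     if node_type == "method":
--         if len(parts) > 2:
--             return ".".join(parts[:-2])
--         return qualified_name
--     if len(parts) > 1:
--         return ".".join(parts[:-1])
--     return qualified_name
-- ===== SOURCE B (Python) =====
-- def normalize_call_identifiers(resolved_calls):
--     # build pass: group — collect ALL distinct full forms per (language, scope) and terminal
--     buckets = {}
--     for language, qualified, node_type, identifiers in resolved_calls: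
--         scope = _module_scope_for_call(qualified, node_type)
--         bucket = buckets.setdefault((language, scope), {})
--         for identifier in identifiers:
--             if "." in identifier:
--                 terminal = identifier.split(".")[-1]
--                 forms = bucket.get(terminal, set())
--                 forms.add(identifier)
--                 bucket[terminal] = forms
--     # reduce: a terminal is unambiguous iff exactly one full form was seen
--     terminal_map_by_scope = {
--         key: {terminal: (next(iter(forms)) if len(forms) == 1 else None)
--               for terminal, forms in bucket.items()}
--         for key, bucket in buckets.items()
--     }
--     # apply pass: comprehension-based rewrite of dotless identifiers
--     result = []
--     for language, qualified, node_type, identifiers in resolved_calls: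
--         scope = _module_scope_for_call(qualified, node_type)
--         terminal_map = terminal_map_by_scope.get((language, scope), {})
--         result.append((language, qualified, node_type,
--                        [identifier if "." in identifier or not terminal_map.get(identifier)
--                         else terminal_map[identifier]
--                         for identifier in identifiers]))
--     return result
--
-- def _module_scope_for_call(qualified_name, node_type):
--     parts = qualified_name.split(".")
--     if node_type == "method":
--         return ".".join(parts[:-2]) if len(parts) > 2 else qualified_name
--     return ".".join(parts[:-1]) if len(parts) > 1 else qualified_name
-- ===== Notes on version B (the rewrite author's own statement) =====
-- stated objective: alternative
-- what changed: The build pass is replaced by group-then-reduce: per (language, scope) bucket each terminal collects the SET of all distinct full identifiers seen, and a separate reduction step turns each set into its unique element (or None when ambiguous); the apply pass is rewritten as a comprehension over a plain get of the reduced map.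
import Mathlib
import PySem

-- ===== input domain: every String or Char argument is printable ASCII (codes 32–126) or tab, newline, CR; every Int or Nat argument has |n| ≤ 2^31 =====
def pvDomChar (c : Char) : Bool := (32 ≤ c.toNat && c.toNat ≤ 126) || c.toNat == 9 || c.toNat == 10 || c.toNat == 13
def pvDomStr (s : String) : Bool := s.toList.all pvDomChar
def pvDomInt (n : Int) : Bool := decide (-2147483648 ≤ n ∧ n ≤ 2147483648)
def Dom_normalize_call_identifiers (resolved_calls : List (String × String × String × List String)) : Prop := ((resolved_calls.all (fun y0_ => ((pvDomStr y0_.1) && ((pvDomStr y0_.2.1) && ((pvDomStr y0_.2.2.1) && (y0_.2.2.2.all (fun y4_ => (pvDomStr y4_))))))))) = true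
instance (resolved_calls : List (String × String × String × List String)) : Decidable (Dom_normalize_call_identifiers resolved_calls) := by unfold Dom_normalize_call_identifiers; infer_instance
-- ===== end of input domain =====

-- B replaces A's conflict-tracking build pass by group-then-reduce (sets of full forms per
-- terminal, reduced to the unique element or None afterwards) and a comprehension apply pass:
-- an alternative decomposition of the same cost (objective: alternative).

-- shared helper: _module_scope_for_call (identical in both Pythons)
def module_scope_for_call (qualified_name : String) (node_type : String) : String :=
  let parts := (PySem.Str.split? qualified_name ".").getD []  -- sep "." ≠ "": split? is always some
  if node_type == "method" then
    if parts.length > 2 then PySem.Str.join "." (parts.take (parts.length - 2))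
    else qualified_name
  else if parts.length > 1 then PySem.Str.join "." (parts.take (parts.length - 1))
  else qualified_name

-- ===== PORT A =====
-- identifier.rsplit(".", 1)[-1] is the piece after the LAST "." — for a single-character
-- separator this is exactly the last piece of split("."); split never yields [], so [-1] is safe.
def pvA_updBucket (bucket : PySem.Dict String (Option String)) (identifier : String) :
    PySem.Dict String (Option String) :=
  if PySem.Str.isIn "." identifier then
    let terminal := ((PySem.Str.split? identifier ".").getD []).getLastD ""
    match bucket.get? terminal with
    | some none => bucket                 -- existing is None and terminal in bucket: continue
    | some (some existing) =>
        if existing = identifier then bucket else bucket.insert terminal none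
    | none => bucket.insert terminal (some identifier)
  else bucket

-- build loop; setdefault-then-mutate of the inner dict ends as one insert of the final bucket
def pvA_build (resolved_calls : List (String × String × String × List String)) :
    PySem.Dict (String × String) (PySem.Dict String (Option String)) :=
  resolved_calls.foldl (fun m c =>
    let scope := module_scope_for_call c.2.1 c.2.2.1
    let bucket0 := (m.get? (c.1, scope)).getD PySem.Dict.empty
    m.insert (c.1, scope) (c.2.2.2.foldl pvA_updBucket bucket0)) PySem.Dict.empty

def pvA_updated (tm : PySem.Dict String (Option String)) (identifiers : List String) :
    List String :=
  identifiers.foldl (fun u identifier =>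
    if PySem.Str.isIn "." identifier then u ++ [identifier]
    else match tm.get? identifier with
      | some (some mapped) =>           -- 'if mapped:' — truthy = non-None and non-empty
          if mapped ≠ "" then u ++ [mapped] else u ++ [identifier]
      | _ => u ++ [identifier]) []

def normalize_call_identifiers (resolved_calls : List (String × String × String × List String)) :
    List (String × String × String × List String) :=
  let tmbs := pvA_build resolved_calls
  resolved_calls.foldl (fun normalized c =>
    let scope := module_scope_for_call c.2.1 c.2.2.1
    let tm := (tmbs.get? (c.1, scope)).getD PySem.Dict.empty
    normalized ++ [(c.1, c.2.1, c.2.2.1, pvA_updated tm c.2.2.2)]) []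

-- ===== PORT B =====
def pvB_updBucket (bucket : PySem.Dict String (PySem.Set String)) (identifier : String) :
    PySem.Dict String (PySem.Set String) :=
  if PySem.Str.isIn "." identifier then
    let terminal := ((PySem.Str.split? identifier ".").getD []).getLastD ""
    bucket.insert terminal
      (PySem.Set.add ((bucket.get? terminal).getD PySem.Set.empty) identifier)
  else bucket

def pvB_build (resolved_calls : List (String × String × String × List String)) :
    PySem.Dict (String × String) (PySem.Dict String (PySem.Set String)) :=
  resolved_calls.foldl (fun m c =>
    let scope := module_scope_for_call c.2.1 c.2.2.1
    let bucket0 := (m.get? (c.1, scope)).getD PySem.Dict.empty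
    m.insert (c.1, scope) (c.2.2.2.foldl pvB_updBucket bucket0)) PySem.Dict.empty

-- next(iter(forms)) if len(forms) == 1 else None — a one-element set iterates deterministically
def pvB_reduceVal (forms : PySem.Set String) : Option String :=
  if forms.length == 1 then some (forms.headD "") else none

def pvB_reduce (bucket : PySem.Dict String (PySem.Set String)) :
    PySem.Dict String (Option String) :=
  PySem.Dict.mk (bucket.items.map (fun p => (p.1, pvB_reduceVal p.2)))

def normalize_call_identifiers_alt (resolved_calls : List (String × String × String × List String)) :
    List (String × String × String × List String) :=
  let M := PySem.Dict.mk ((pvB_build resolved_calls).items.map (fun p => (p.1, pvB_reduce p.2)))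
  resolved_calls.map (fun c =>
    let scope := module_scope_for_call c.2.1 c.2.2.1
    let tm := (M.get? (c.1, scope)).getD PySem.Dict.empty
    (c.1, c.2.1, c.2.2.1, c.2.2.2.map (fun identifier =>
      if PySem.Str.isIn "." identifier then identifier
      else match tm.get? identifier with
        | some (some mapped) => if mapped ≠ "" then mapped else identifier
        | _ => identifier)))

-- ===== PRECONDITION & SPEC =====
def Spec_normalize_call_identifiers (resolved_calls : List (String × String × String × List String)) (out : List (String × String × String × List String)) : Prop := out = normalize_call_identifiers_alt resolved_calls
instance (resolved_calls : List (String × String × String × List String)) (out : List (String × String × String × List String)) : Decidable (Spec_normalize_call_identifiers resolved_calls out) := by unfold Spec_normalize_call_identifiers; infer_instance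

-- ===== CLAIM (what is proved, stated in full; the proofs are below) =====
def Claim_equal_normalize_call_identifiers : Prop := ∀ (resolved_calls : List (String × String × String × List String)), Dom_normalize_call_identifiers resolved_calls → Spec_normalize_call_identifiers resolved_calls (normalize_call_identifiers resolved_calls)

-- ===== LEMMAS AND PROOFS =====

-- A's bucket value at a terminal is exactly the reduction of B's set of full forms there
def BucketRel (a : PySem.Dict String (Option String))
    (b : PySem.Dict String (PySem.Set String)) : Prop :=
  ∀ t, a.get? t = (b.get? t).map pvB_reduceVal ∧ ∀ s, b.get? t = some s → s ≠ []

theorem bucketRel_empty : BucketRel PySem.Dict.empty PySem.Dict.empty := by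
  intro t
  constructor
  · simp [PySem.Dict.get?_empty]
  · intro s hs; simp [PySem.Dict.get?_empty] at hs

theorem bucketRel_step (a : PySem.Dict String (Option String))
    (b : PySem.Dict String (PySem.Set String)) (i : String)
    (h : BucketRel a b) : BucketRel (pvA_updBucket a i) (pvB_updBucket b i) := by
  unfold pvA_updBucket pvB_updBucket
  by_cases hd : PySem.Str.isIn "." i
  · simp only [hd, if_true]
    generalize ((PySem.Str.split? i ".").getD []).getLastD "" = term
    intro t
    rcases h t with ⟨hget, hne⟩
    rcases h term with ⟨hgterm, hneterm⟩
    cases hb : b.get? term with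
    | none =>
        have ha : a.get? term = none := by rw [hgterm, hb]; rfl
        simp only [ha]
        have hadd : PySem.Set.add ((none : Option (PySem.Set String)).getD PySem.Set.empty) i
            = [i] := by simp [PySem.Set.add, PySem.Set.empty]
        rw [hadd]
        constructor
        · by_cases ht : t = term
          · rw [ht, PySem.Dict.get?_insert_self, PySem.Dict.get?_insert_self]
            simp [pvB_reduceVal]
          · rw [PySem.Dict.get?_insert_of_ne _ _ ht, PySem.Dict.get?_insert_of_ne _ _ ht]
            exact hget
        · intro s hs
          by_cases ht : t = term
          · rw [ht, PySem.Dict.get?_insert_self] at hs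
            injection hs with h'
            simp [← h']
          · rw [PySem.Dict.get?_insert_of_ne _ _ ht] at hs
            exact hne s hs
    | some s =>
        have ha : a.get? term = some (pvB_reduceVal s) := by rw [hgterm, hb]; rfl
        have hsne : s ≠ [] := hneterm s hb
        simp only [ha, Option.getD_some]
        rcases s with _ | ⟨x, _ | ⟨y, rest⟩⟩
        · exact absurd rfl hsne
        · -- singleton {x}
          have hred : pvB_reduceVal [x] = some x := by simp [pvB_reduceVal]
          simp only [hred]
          by_cases hxi : x = i
          · subst hxi
            have hadd : PySem.Set.add [x] x = [x] := by simp [PySem.Set.add]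
            rw [hadd]
            simp only [if_true]
            constructor
            · by_cases ht : t = term
              · rw [ht, PySem.Dict.get?_insert_self]
                simp [ha, hred]
              · rw [PySem.Dict.get?_insert_of_ne _ _ ht]; exact hget
            · intro s' hs'
              by_cases ht : t = term
              · rw [ht, PySem.Dict.get?_insert_self] at hs'
                injection hs' with h'
                simp [← h']
              · rw [PySem.Dict.get?_insert_of_ne _ _ ht] at hs'
                exact hne s' hs'
          · have hxi' : ¬ i = x := fun hh => hxi hh.symm
            have hadd : PySem.Set.add [x] i = [x, i] := by
              simp [PySem.Set.add, hxi']
            rw [hadd]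
            simp only [if_neg hxi]
            constructor
            · by_cases ht : t = term
              · rw [ht, PySem.Dict.get?_insert_self, PySem.Dict.get?_insert_self]
                simp [pvB_reduceVal]
              · rw [PySem.Dict.get?_insert_of_ne _ _ ht, PySem.Dict.get?_insert_of_ne _ _ ht]
                exact hget
            · intro s' hs'
              by_cases ht : t = term
              · rw [ht, PySem.Dict.get?_insert_self] at hs'
                injection hs' with h'
                simp [← h']
              · rw [PySem.Dict.get?_insert_of_ne _ _ ht] at hs'
                exact hne s' hs'
        · -- already ambiguous: two or more distinct forms
          have hred : pvB_reduceVal (x :: y :: rest) = none := by simp [pvB_reduceVal]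
          simp only [hred]
          have hlen : 2 ≤ (PySem.Set.add (x :: y :: rest) i).length := by
            simp only [PySem.Set.add]
            split <;> simp
          have hredadd : pvB_reduceVal (PySem.Set.add (x :: y :: rest) i) = none := by
            unfold pvB_reduceVal
            rcases hadd : PySem.Set.add (x :: y :: rest) i with _ | ⟨a1, _ | ⟨a2, r2⟩⟩
            · rw [hadd] at hlen; simp at hlen
            · rw [hadd] at hlen; simp at hlen
            · simp
          constructor
          · by_cases ht : t = term
            · rw [ht, PySem.Dict.get?_insert_self]
              simp [ha, hred, hredadd]
            · rw [PySem.Dict.get?_insert_of_ne _ _ ht]; exact hget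
          · intro s' hs'
            by_cases ht : t = term
            · rw [ht, PySem.Dict.get?_insert_self] at hs'
              injection hs' with h'
              intro hnil
              rw [h', hnil] at hlen
              simp at hlen
            · rw [PySem.Dict.get?_insert_of_ne _ _ ht] at hs'
              exact hne s' hs'
  · simp only [hd]
    exact h

theorem bucketRel_fold (l : List String) :
    ∀ (a : PySem.Dict String (Option String)) (b : PySem.Dict String (PySem.Set String)),
    BucketRel a b → BucketRel (l.foldl pvA_updBucket a) (l.foldl pvB_updBucket b) := by
  induction l with
  | nil => intro a b h; exact h
  | cons x xs ih =>
      intro a b h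
      exact ih _ _ (bucketRel_step a b x h)

def OuterRel (A : PySem.Dict (String × String) (PySem.Dict String (Option String)))
    (B : PySem.Dict (String × String) (PySem.Dict String (PySem.Set String))) : Prop :=
  ∀ k, BucketRel ((A.get? k).getD PySem.Dict.empty) ((B.get? k).getD PySem.Dict.empty)

theorem outerRel_build (rc : List (String × String × String × List String)) :
    OuterRel (pvA_build rc) (pvB_build rc) := by
  unfold pvA_build pvB_build
  suffices h : ∀ (A : PySem.Dict (String × String) (PySem.Dict String (Option String)))
      (B : PySem.Dict (String × String) (PySem.Dict String (PySem.Set String))),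
      OuterRel A B →
      OuterRel (rc.foldl (fun m c =>
          m.insert (c.1, module_scope_for_call c.2.1 c.2.2.1)
            (c.2.2.2.foldl pvA_updBucket
              ((m.get? (c.1, module_scope_for_call c.2.1 c.2.2.1)).getD PySem.Dict.empty))) A)
        (rc.foldl (fun m c =>
          m.insert (c.1, module_scope_for_call c.2.1 c.2.2.1)
            (c.2.2.2.foldl pvB_updBucket
              ((m.get? (c.1, module_scope_for_call c.2.1 c.2.2.1)).getD PySem.Dict.empty))) B) by
    exact h PySem.Dict.empty PySem.Dict.empty (fun k => by
      simp only [PySem.Dict.get?_empty, Option.getD]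
      exact bucketRel_empty)
  induction rc with
  | nil => intro A B h; exact h
  | cons c cs ih =>
      intro A B h
      apply ih
      intro k
      by_cases hk : k = (c.1, module_scope_for_call c.2.1 c.2.2.1)
      · subst hk
        rw [PySem.Dict.get?_insert_self, PySem.Dict.get?_insert_self]
        exact bucketRel_fold _ _ _ (h _)
      · rw [PySem.Dict.get?_insert_of_ne _ _ hk, PySem.Dict.get?_insert_of_ne _ _ hk]
        exact h k

-- lookup through a value-mapped dict literal
theorem get?_mapValues {ν ν' : Type} (f : ν → ν') (l : List (String × ν)) (k : String) :
    (PySem.Dict.mk (l.map (fun p => (p.1, f p.2)))).get? k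
      = Option.map f ((PySem.Dict.mk l).get? k) := by
  induction l with
  | nil => rfl
  | cons p ps ih =>
      obtain ⟨pk, pv⟩ := p
      simp only [List.map_cons, PySem.Dict.get?_mk_cons]
      by_cases hk : (pk == k) = true
      · simp [hk]
      · simp [hk, ih]

theorem get?_mapValues_pair {ν ν' : Type} (f : ν → ν')
    (l : List ((String × String) × ν)) (k : String × String) :
    (PySem.Dict.mk (l.map (fun p => (p.1, f p.2)))).get? k
      = Option.map f ((PySem.Dict.mk l).get? k) := by
  induction l with
  | nil => rfl
  | cons p ps ih =>
      obtain ⟨pk, pv⟩ := p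
      simp only [List.map_cons, PySem.Dict.get?_mk_cons]
      by_cases hk : (pk == k) = true
      · simp [hk]
      · simp [hk, ih]

-- the reduced lookup B performs equals reduceVal mapped over the raw bucket lookup
theorem get?_reduce (b : PySem.Dict String (PySem.Set String)) (t : String) :
    (pvB_reduce b).get? t = Option.map pvB_reduceVal (b.get? t) := by
  cases b with
  | mk items => exact get?_mapValues pvB_reduceVal items t

theorem get?_M (B : PySem.Dict (String × String) (PySem.Dict String (PySem.Set String)))
    (k : String × String) :
    (PySem.Dict.mk (B.items.map (fun p => (p.1, pvB_reduce p.2)))).get? k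
      = Option.map pvB_reduce (B.get? k) := by
  cases B with
  | mk items => exact get?_mapValues_pair pvB_reduce items k

-- the per-identifier rewrite agrees whenever the two lookup maps agree pointwise
theorem updated_eq (tmA : PySem.Dict String (Option String))
    (tmB : PySem.Dict String (Option String))
    (hpt : ∀ t, tmA.get? t = tmB.get? t) (ids : List String) :
    pvA_updated tmA ids = ids.map (fun identifier =>
      if PySem.Str.isIn "." identifier then identifier
      else match tmB.get? identifier with
        | some (some mapped) => if mapped ≠ "" then mapped else identifier
        | _ => identifier) := by
  unfold pvA_updated
  have hbody : (fun (u : List String) identifier =>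
      if PySem.Str.isIn "." identifier then u ++ [identifier]
      else match tmA.get? identifier with
        | some (some mapped) => if mapped ≠ "" then u ++ [mapped] else u ++ [identifier]
        | _ => u ++ [identifier])
    = (fun (u : List String) identifier => u ++ [(fun identifier =>
      if PySem.Str.isIn "." identifier then identifier
      else match tmB.get? identifier with
        | some (some mapped) => if mapped ≠ "" then mapped else identifier
        | _ => identifier) identifier]) := by
    funext u i
    by_cases hd : PySem.Str.isIn "." i = true
    · simp only [if_pos hd]
    · simp only [if_neg hd]
      rw [hpt i]
      rcases tmB.get? i with _ | ⟨_ | m⟩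
      · rfl
      · rfl
      · by_cases hm : m = ""
        · simp [hm]
        · simp [hm]
  rw [hbody, PySem.List.foldl_append_singleton_eq_map]
  simp

-- ===== VERDICT (by name: the statement is the Claim_ definition above) =====
theorem normalize_call_identifiers_spec : Claim_equal_normalize_call_identifiers := by
  intro rc _
  unfold Spec_normalize_call_identifiers normalize_call_identifiers normalize_call_identifiers_alt
  rw [PySem.List.foldl_append_singleton_eq_map]
  simp only [List.nil_append]
  apply List.map_congr_left
  intro c _
  have houter := outerRel_build rc
  set key := (c.1, module_scope_for_call c.2.1 c.2.2.1) with hkey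
  have hpt : ∀ t,
      (((pvA_build rc).get? key).getD PySem.Dict.empty).get? t
        = (((PySem.Dict.mk ((pvB_build rc).items.map
              (fun p => (p.1, pvB_reduce p.2)))).get? key).getD PySem.Dict.empty).get? t := by
    intro t
    rcases houter key t with ⟨hget, -⟩
    rw [hget, get?_M]
    cases hb : (pvB_build rc).get? key with
    | none => simp [PySem.Dict.get?_empty]
    | some bb => simp [get?_reduce]
  rw [updated_eq _ _ hpt c.2.2.2]
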